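-- pv_equiv track=rewrite | github.com/zer0who/ProblemSolve | python/programmers/lv2/select_tangerine.py | solution
-- ===== SOURCE A (Python) =====
-- def solution(k, tangerine):
--     answer = 0
--     tangerine_dict = {}
--     for i in range(len(tangerine)):
--         if tangerine[i] not in tangerine_dict:
--             tangerine_dict[tangerine[i]] = 1
--         else:
--             tangerine_dict[tangerine[i]] += 1
--
--     tangerine_dict = sorted(tangerine_dict.items(), key = lambda item: item[1], reverse = True)
--
--     count = 0
--     for i in range(len(tangerine_dict)):
--         count += tangerine_dict[i][1]
--
--         if count >= k:
--             answer = i+1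
--             break
--
--     return answer
-- ===== SOURCE B (Python) =====
-- def solution(k, tangerine):
--     counts = {}
--     for t in tangerine:
--         counts[t] = counts.get(t, 0) + 1
--     if not counts:
--         return 0
--     m = max(counts.values())
--     bucket = {}
--     for c in counts.values():
--         bucket[c] = bucket.get(c, 0) + 1
--     total = 0
--     kinds = 0
--     for c in range(m, 0, -1):
--         for _ in range(bucket.get(c, 0)):
--             total += c
--             kinds += 1
--             if total >= k:
--                 return kinds
--     return 0
-- ===== Notes on version B (the rewrite author's own statement) =====
-- stated objective: alternative
-- what changed: B replaces A's comparison sort of the (kind, count) pairs by a frequency-of-frequencies bucket dict traversed from the maximum count down to 1, adding counts greedily until the total reaches k.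
import Mathlib
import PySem

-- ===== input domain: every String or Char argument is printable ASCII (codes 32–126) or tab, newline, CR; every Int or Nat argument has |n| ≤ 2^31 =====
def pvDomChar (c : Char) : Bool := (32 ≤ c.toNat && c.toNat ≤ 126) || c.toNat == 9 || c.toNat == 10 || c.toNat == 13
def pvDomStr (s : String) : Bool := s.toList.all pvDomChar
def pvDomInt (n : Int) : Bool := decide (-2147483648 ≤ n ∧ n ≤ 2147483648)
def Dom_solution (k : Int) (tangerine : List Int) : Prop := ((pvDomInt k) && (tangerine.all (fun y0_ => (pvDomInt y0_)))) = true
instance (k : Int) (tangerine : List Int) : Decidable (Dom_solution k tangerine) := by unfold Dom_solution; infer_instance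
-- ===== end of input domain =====

-- B replaces A's comparison sort of the (kind, count) pairs by a frequency-of-frequencies
-- bucket traversed from the maximum count downwards (objective: alternative algorithm).

-- ===== PORT A =====
-- A's second loop: 'for i in range(len(td)): count += td[i][1]; if count >= k: answer = i+1; break'
def pvLoopA (k : Int) : List (Int × Int) → Int → Int → Int
  | [], _count, _i => 0
  | p :: rest, count, i =>
    let count' := count + p.2
    if count' ≥ k then i + 1 else pvLoopA k rest count' (i + 1)

def solution (k : Int) (tangerine : List Int) : Int :=
  let tangerine_dict :=
    (PySem.List.pyRange 0 (PySem.List.len tangerine) 1).foldl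
      (fun d i =>
        if d.contains (PySem.List.pyGetD tangerine i 0) = false
        then d.insert (PySem.List.pyGetD tangerine i 0) 1
        else d.insert (PySem.List.pyGetD tangerine i 0)
               (d.getD (PySem.List.pyGetD tangerine i 0) 0 + 1))
      PySem.Dict.empty
  let sortedItems := PySem.List.sorted tangerine_dict.items (fun item => item.2) true
  pvLoopA k sortedItems 0 0

-- ===== PORT B =====
-- B's inner loop: 'for _ in range(bucket.get(c, 0)): total += c; kinds += 1; if total >= k: return kinds'
def pvInnerB (k c : Int) : Nat → Int → Int → Sum Int (Int × Int)
  | 0, total, kinds => Sum.inr (total, kinds)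
  | n + 1, total, kinds =>
    let total' := total + c
    let kinds' := kinds + 1
    if total' ≥ k then Sum.inl kinds' else pvInnerB k c n total' kinds'

-- B's outer loop: 'for c in range(m, 0, -1): …', counting c down from m to 1
def pvOuterB (k : Int) (bucket : PySem.Dict Int Int) : Nat → Int → Int → Int
  | 0, _total, _kinds => 0
  | c + 1, total, kinds =>
    match pvInnerB k ((c : Int) + 1) ((bucket.getD ((c : Int) + 1) 0).toNat) total kinds with
    | Sum.inl ans => ans
    | Sum.inr s => pvOuterB k bucket c s.1 s.2

def solution_alt (k : Int) (tangerine : List Int) : Int :=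
  let counts := tangerine.foldl (fun d t => d.insert t (d.getD t 0 + 1)) PySem.Dict.empty
  if counts.items = [] then 0
  else
    match PySem.List.max? counts.values (fun y => y) with
    | none => 0
    | some m =>
      let bucket := counts.values.foldl (fun d c => d.insert c (d.getD c 0 + 1)) PySem.Dict.empty
      pvOuterB k bucket m.toNat 0 0

-- ===== PRECONDITION & SPEC =====
def Spec_solution (k : Int) (tangerine : List Int) (out : Int) : Prop := out = solution_alt k tangerine
instance (k : Int) (tangerine : List Int) (out : Int) : Decidable (Spec_solution k tangerine out) := by unfold Spec_solution; infer_instance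

-- ===== CLAIM (what is proved, stated in full; the proofs are below) =====
def Claim_equal_solution : Prop := ∀ (k : Int) (tangerine : List Int), Dom_solution k tangerine → Spec_solution k tangerine (solution k tangerine)

-- ===== LEMMAS AND PROOFS =====

-- common core: greedily take counts in the given order; answer = number taken when total first reaches k, else 0
def pvGreedy (k : Int) : List Int → Int → Int → Int
  | [], _total, _kinds => 0
  | c :: cs, total, kinds =>
    if total + c ≥ k then kinds + 1 else pvGreedy k cs (total + c) (kinds + 1)

-- the list of counts B's bucket traversal visits: bucket[c] copies of c, for c = n down to 1
def pvFlat (bucket : PySem.Dict Int Int) : Nat → List Int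
  | 0 => []
  | c + 1 => List.replicate ((bucket.getD ((c : Int) + 1) 0).toNat) ((c : Int) + 1) ++ pvFlat bucket c

theorem pvLoopA_eq_greedy (k : Int) (ps : List (Int × Int)) (count i : Int) :
    pvLoopA k ps count i = pvGreedy k (ps.map Prod.snd) count i := by
  induction ps generalizing count i with
  | nil => rfl
  | cons p rest ih => simp only [pvLoopA, pvGreedy, List.map]; split_ifs <;> simp [ih]

theorem pvInnerB_greedy (k c : Int) (n : Nat) (total kinds : Int) (rest : List Int) :
    pvGreedy k (List.replicate n c ++ rest) total kinds =
      (match pvInnerB k c n total kinds with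
       | Sum.inl a => a
       | Sum.inr s => pvGreedy k rest s.1 s.2) := by
  induction n generalizing total kinds with
  | zero => rfl
  | succ n ih =>
    simp only [List.replicate_succ, List.cons_append, pvGreedy, pvInnerB]
    split_ifs <;> simp [ih]

theorem pvOuterB_eq_greedy (k : Int) (bucket : PySem.Dict Int Int) (c : Nat) (total kinds : Int) :
    pvOuterB k bucket c total kinds = pvGreedy k (pvFlat bucket c) total kinds := by
  induction c generalizing total kinds with
  | zero => rfl
  | succ c ih =>
    simp only [pvOuterB, pvFlat, pvInnerB_greedy]
    cases pvInnerB k ((c : Int) + 1) ((bucket.getD ((c : Int) + 1) 0).toNat) total kinds with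
    | inl a => rfl
    | inr s => exact ih s.1 s.2

-- A's dict-building loop builds Counter(tangerine)
theorem pvDictA_eq_counter (tangerine : List Int) :
    (PySem.List.pyRange 0 (PySem.List.len tangerine) 1).foldl
      (fun d i =>
        if d.contains (PySem.List.pyGetD tangerine i 0) = false
        then d.insert (PySem.List.pyGetD tangerine i 0) 1
        else d.insert (PySem.List.pyGetD tangerine i 0)
               (d.getD (PySem.List.pyGetD tangerine i 0) 0 + 1))
      PySem.Dict.empty = PySem.Dict.counter tangerine := by
  refine (PySem.List.foldl_pyRange_zero_pyGetD tangerine 0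
      (fun (d : PySem.Dict Int Int) x => if d.contains x = false then d.insert x 1 else d.insert x (d.getD x 0 + 1))
      PySem.Dict.empty).trans ?_
  refine (PySem.List.foldl_congr_mem (l := tangerine)
      (f := fun (d : PySem.Dict Int Int) x => if d.contains x = false then d.insert x 1 else d.insert x (d.getD x 0 + 1))
      (g := fun (d : PySem.Dict Int Int) x => d.insert x (d.getD x 0 + 1))
      (init := PySem.Dict.empty)
      (h := by
        intro d x _
        simp only []
        by_cases hc : d.contains x = false
        · rw [if_pos hc, PySem.Dict.getD_of_not_contains d 0 hc]; norm_num
        · rw [if_neg hc])).trans ?_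
  exact PySem.Dict.foldl_insert_getD_add_one_eq_counter tangerine

theorem pvFlat_count (vals : List Int) (c : Nat) (x : Int) :
    (pvFlat (PySem.Dict.counter vals) c).count x =
      if 0 < x ∧ x ≤ (c : Int) then vals.count x else 0 := by
  induction c with
  | zero => rw [if_neg (by omega)]; rfl
  | succ c ih =>
    simp only [pvFlat, List.count_append, List.count_replicate, ih,
      PySem.Dict.getD_counter, Int.toNat_natCast, beq_iff_eq]
    by_cases hx : x = (c : Int) + 1
    · subst hx
      rw [if_pos rfl, if_neg (by omega), if_pos (by push_cast; omega)]
      omega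
    · rw [if_neg (fun h => hx h.symm)]
      by_cases h1 : 0 < x ∧ x <= (c : Int)
      · rw [if_pos h1, if_pos (by push_cast; omega)]
        omega
      · rw [if_neg h1, if_neg (by push_cast at hx h1 ⊢; omega)]

theorem pvFlat_perm (vals : List Int) (m : Int)
    (h1 : ∀ v ∈ vals, 1 ≤ v) (h2 : ∀ v ∈ vals, v ≤ m) :
    (pvFlat (PySem.Dict.counter vals) m.toNat).Perm vals := by
  rw [List.perm_iff_count]
  intro x
  rw [pvFlat_count]
  by_cases h : 0 < x ∧ x ≤ (m.toNat : Int)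
  · rw [if_pos h]
  · rw [if_neg h]
    refine (List.count_eq_zero.mpr ?_).symm
    intro hx
    have hx1 := h1 x hx
    have hx2 := h2 x hx
    omega

theorem pvFlat_le (bucket : PySem.Dict Int Int) (c : Nat) :
    ∀ x ∈ pvFlat bucket c, x ≤ (c : Int) := by
  induction c with
  | zero => simp [pvFlat]
  | succ c ih =>
    intro x hx
    simp only [pvFlat, List.mem_append, List.mem_replicate] at hx
    push_cast
    rcases hx with ⟨_, rfl⟩ | hx
    · omega
    · have := ih x hx; omega

theorem pvFlat_pairwise (bucket : PySem.Dict Int Int) (c : Nat) :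
    (pvFlat bucket c).Pairwise (fun a b => b ≤ a) := by
  induction c with
  | zero => simp [pvFlat]
  | succ c ih =>
    simp only [pvFlat]
    refine List.pairwise_append.mpr ⟨?_, ih, ?_⟩
    · exact List.pairwise_replicate.mpr (Or.inr le_rfl)
    · intro a ha b hb
      simp only [List.mem_replicate] at ha
      have := pvFlat_le bucket c b hb
      omega

-- ===== VERDICT (by name: the statement is the Claim_ definition above) =====
theorem solution_spec : Claim_equal_solution := by
  intro k tangerine _
  unfold Spec_solution
  simp only [solution, solution_alt]
  rw [pvDictA_eq_counter, PySem.Dict.foldl_insert_getD_add_one_eq_counter]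
  by_cases ht : (PySem.Dict.counter tangerine).items = []
  · rw [if_pos ht, ht]
    rfl
  · rw [if_neg ht]
    have hvals : (PySem.Dict.counter tangerine).values
        = (PySem.Dict.counter tangerine).items.map Prod.snd := rfl
    have hvne : (PySem.Dict.counter tangerine).values ≠ [] := by
      rw [hvals]; simpa using ht
    obtain ⟨m, hm⟩ : ∃ m, PySem.List.max? (PySem.Dict.counter tangerine).values
        (fun y => y) = some m := by
      cases h : PySem.List.max? (PySem.Dict.counter tangerine).values (fun y => y) with
      | none => exact absurd ((PySem.List.max?_eq_none_iff _ _).mp h) hvne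
      | some m => exact ⟨m, rfl⟩
    rw [hm, PySem.Dict.foldl_insert_getD_add_one_eq_counter]
    have hpos : ∀ v ∈ (PySem.Dict.counter tangerine).values, 1 ≤ v := by
      intro v hv
      rw [hvals, PySem.Dict.items_counter] at hv
      simp only [List.map_map, List.mem_map, Function.comp] at hv
      obtain ⟨y, hy, rfl⟩ := hv
      have : y ∈ tangerine := (PySem.Set.mem_ofList tangerine y).mp hy
      have := List.count_pos_iff.mpr this
      omega
    have hle : ∀ v ∈ (PySem.Dict.counter tangerine).values, v ≤ m :=
      PySem.List.max?_isMax hm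
    have hmmem : m ∈ (PySem.Dict.counter tangerine).values := PySem.List.max?_mem hm
    have hm1 : 1 ≤ m := hpos m hmmem
    have hmt : ((m.toNat : Nat) : Int) = m := Int.toNat_of_nonneg (by omega)
    show pvLoopA k (PySem.List.sorted (PySem.Dict.counter tangerine).items
          (fun item => item.2) true) 0 0
        = pvOuterB k (PySem.Dict.counter (PySem.Dict.counter tangerine).values) m.toNat 0 0
    rw [pvLoopA_eq_greedy, pvOuterB_eq_greedy]
    have hkey : (PySem.List.sorted (PySem.Dict.counter tangerine).items
          (fun item => item.2) true).map Prod.snd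
        = pvFlat (PySem.Dict.counter (PySem.Dict.counter tangerine).values) m.toNat := by
      apply List.Perm.eq_of_pairwise (le := fun a b : Int => b ≤ a)
      · exact fun a b _ _ h1 h2 => le_antisymm h2 h1
      · exact List.Pairwise.map Prod.snd (fun a b h => h)
          (PySem.List.sorted_pairwise_rev (PySem.Dict.counter tangerine).items
            (fun item => item.2))
      · exact pvFlat_pairwise _ _
      · refine ((PySem.List.sorted_perm _ _ _).map Prod.snd).trans ?_
        rw [← hvals]
        refine (pvFlat_perm (PySem.Dict.counter tangerine).values m hpos ?_).symm
        intro v hv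
        exact hle v hv
    rw [hkey]
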